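-- pv_equiv track=rewrite | github.com/thom-heinrich/twinr | src/twinr/agent/self_coding/runtime/contracts.py | _weekday_tuple
-- ===== SOURCE A (Python) =====
-- def _weekday_tuple(value: object | None) -> tuple[int, ...]:
--     if value is None:
--         return ()
--     if not isinstance(value, (list, tuple)):
--         raise TypeError("weekdays must be a list")
--     normalized: set[int] = set()
--     for item in value:
--         if isinstance(item, bool) or not isinstance(item, int):  # AUDIT-FIX(#4): reject silent truncation/coercion from floats and numeric strings.
--             raise TypeError("weekdays must contain integers between 0 and 6")
--         if item < 0 or item > 6:
--             raise ValueError("weekdays entries must be between 0 and 6")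
--         normalized.add(item)
--     return tuple(sorted(normalized))  # AUDIT-FIX(#4): canonicalize weekday order for deterministic persisted artifacts.
-- ===== SOURCE B (Python) =====
-- def _weekday_tuple(value: object | None) -> tuple[int, ...]:
--     if value is None:
--         return ()
--     if not isinstance(value, (list, tuple)):
--         raise TypeError("weekdays must be a list")
--     for item in value:
--         if isinstance(item, bool) or not isinstance(item, int):
--             raise TypeError("weekdays must contain integers between 0 and 6")
--         if item < 0 or item > 6:
--             raise ValueError("weekdays entries must be between 0 and 6")
--     # No collected set at all: the canonical result is the bounded weekday
--     # domain 0..6 filtered by membership in the (validated) input.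
--     return tuple(d for d in range(7) if d in value)
-- ===== Notes on version B (the rewrite author's own statement) =====
-- stated objective: alternative
-- what changed: B builds no accumulator at all: after a pure validation pass it produces the result by scanning the fixed weekday domain range(7) and testing membership of each day in the input, instead of collecting items into a set and comparison-sorting it.
import Mathlib
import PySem

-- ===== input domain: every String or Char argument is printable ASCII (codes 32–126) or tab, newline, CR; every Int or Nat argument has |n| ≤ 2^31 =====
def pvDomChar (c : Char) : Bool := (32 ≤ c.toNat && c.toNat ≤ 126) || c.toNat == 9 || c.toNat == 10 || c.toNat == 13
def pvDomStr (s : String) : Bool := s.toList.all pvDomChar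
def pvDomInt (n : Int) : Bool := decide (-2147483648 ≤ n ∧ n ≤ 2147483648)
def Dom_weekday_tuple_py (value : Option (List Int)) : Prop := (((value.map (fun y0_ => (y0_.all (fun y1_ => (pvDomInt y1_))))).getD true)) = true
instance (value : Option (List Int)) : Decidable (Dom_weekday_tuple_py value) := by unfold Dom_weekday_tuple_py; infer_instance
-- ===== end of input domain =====

-- B drops the collected set entirely: after validation it filters the fixed domain 0..6 by membership in the input (objective: alternative).


-- ===== PORT A =====
-- A: accumulate the items into a set, then return sorted(set).  The validation raises
-- (TypeError/ValueError) are excluded by Pre_weekday_tuple_py: inside Pre_ every item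
-- passes both checks, so the loop body is exactly 'normalized.add(item)'.
def weekday_tuple_py (value : Option (List Int)) : List Int :=
  match value with
  | none => []
  | some l =>
    let normalized : PySem.Set Int := l.foldl (fun s item => PySem.Set.add s item) PySem.Set.empty
    PySem.List.sorted normalized (fun x => x) false

-- ===== PORT B =====
-- B: a validation-only pass (its raises are excluded by Pre_, as in A; it builds nothing),
-- then 'tuple(d for d in range(7) if d in value)'.
def weekday_tuple_py_alt (value : Option (List Int)) : List Int :=
  match value with
  | none => []
  | some l =>
    (PySem.List.pyRange 0 7 1).filter (fun d => decide (d ∈ l))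

-- ===== PRECONDITION & SPEC =====
-- Pre_ excludes exactly the inputs where A raises: any item outside 0..6
-- (TypeError for non-ints is outside the typed signature; ValueError for out-of-range ints).
def Pre_weekday_tuple_py (value : Option (List Int)) : Prop :=
  (value.getD []).all (fun x => decide (0 ≤ x ∧ x ≤ 6)) = true
instance (value : Option (List Int)) : Decidable (Pre_weekday_tuple_py value) := by unfold Pre_weekday_tuple_py; infer_instance
def pvWitness_weekday_tuple_py : Option (List Int) := some [3, 1, 3, 6, 0]
def Spec_weekday_tuple_py (value : Option (List Int)) (out : List Int) : Prop := out = weekday_tuple_py_alt value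
instance (value : Option (List Int)) (out : List Int) : Decidable (Spec_weekday_tuple_py value out) := by unfold Spec_weekday_tuple_py; infer_instance

-- ===== CLAIM (what is proved, stated in full; the proofs are below) =====
def Claim_equal_weekday_tuple_py : Prop := ∀ (value : Option (List Int)), Dom_weekday_tuple_py value → Pre_weekday_tuple_py value → Spec_weekday_tuple_py value (weekday_tuple_py value)

-- ===== LEMMAS AND PROOFS =====
theorem pv_mem_ofList_int (l : List Int) (x : Int) : x ∈ PySem.Set.ofList l ↔ x ∈ l := by
  simpa using PySem.Set.mem_ofList (xs := l) (x := x)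

-- ===== VERDICT (by name: the statement is the Claim_ definition above) =====
theorem weekday_tuple_py_spec : Claim_equal_weekday_tuple_py := by
  intro value hdom hpre
  unfold Spec_weekday_tuple_py weekday_tuple_py weekday_tuple_py_alt
  match value with
  | none => rfl
  | some l =>
    simp only []
    have hl : ∀ x ∈ l, 0 ≤ x ∧ x ≤ 6 := by
      intro x hx
      have := hpre
      simp only [Pre_weekday_tuple_py, Option.getD_some, List.all_eq_true] at this
      simpa using this x hx
    have hset : (l.foldl (fun s item => PySem.Set.add s item) PySem.Set.empty) = PySem.Set.ofList l := by
      rw [PySem.Set.ofList_eq_foldl]; rfl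
    rw [hset]
    have hrange : PySem.List.pyRange 0 7 1 = [0, 1, 2, 3, 4, 5, 6] := by decide
    rw [hrange]
    -- sorted(set(l)) equals the strictly increasing rearrangement [0..6].filter (∈ l)
    apply PySem.List.sorted_eq_of_perm_of_pairwise_lt
    · rw [List.perm_iff_count]
      intro a
      have hnd1 : (([0, 1, 2, 3, 4, 5, 6] : List Int).filter (fun i => decide (i ∈ l))).Nodup :=
        List.Nodup.filter _ (by decide)
      have hnd2 : (PySem.Set.ofList l).Nodup := PySem.Set.nodup_ofList l
      rw [List.count_eq_of_nodup hnd1, List.count_eq_of_nodup hnd2]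
      have hmem : a ∈ ([0, 1, 2, 3, 4, 5, 6] : List Int).filter (fun i => decide (i ∈ l)) ↔ a ∈ PySem.Set.ofList l := by
        rw [pv_mem_ofList_int, List.mem_filter]
        constructor
        · rintro ⟨-, h⟩; simpa using h
        · intro h
          refine ⟨?_, by simpa using h⟩
          have := hl a h
          simp; omega
      by_cases h : a ∈ PySem.Set.ofList l
      · simp [h, hmem.mpr h]
      · have h1 : a ∉ ([0, 1, 2, 3, 4, 5, 6] : List Int).filter (fun i => decide (i ∈ l)) :=
          fun hc => h (hmem.mp hc)
        simp [h, h1]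
    · exact List.Pairwise.filter _ (by decide)
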